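-- pv_equiv track=rewrite | github.com/serviceprototypinglab/snafu | snafulib/snafu.py | selectexecutors
-- ===== SOURCE A (Python) =====
-- executormapping = {
-- 	"c": "so",
-- 	"docker": None,
-- 	"inmemory": "py",
-- 	"lxc": "py",
-- 	"inmemstateless": "py",
-- 	"java": "class",
-- 	"javascript": "js",
-- 	"openshift": None,
-- 	"proxy": None,
-- 	"python2": "py",
-- 	"python2stateful": "py",
-- 	"python3": "py"
-- }
--
-- def selectexecutors(argsexecutor):
-- 	executors = {"py": "inmemory", "js": "javascript", "class": "java", "so": "c"}
-- 	for executor in argsexecutor: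
-- 		if executormapping[executor]:
-- 			executors[executormapping[executor]] = executor
-- 		else:
-- 			for ex in executors:
-- 				executors[ex] = executor
-- 	executors = list(set(executors.values()))
-- 	return executors
-- ===== SOURCE B (Python) =====
-- executormapping = {
-- 	"c": "so",
-- 	"docker": None,
-- 	"inmemory": "py",
-- 	"lxc": "py",
-- 	"inmemstateless": "py",
-- 	"java": "class",
-- 	"javascript": "js",
-- 	"openshift": None,
-- 	"proxy": None,
-- 	"python2": "py",
-- 	"python2stateful": "py",
-- 	"python3": "py"
-- }
--
-- def selectexecutors(argsexecutor):
-- 	# One forward pass resolves every mapping (raising KeyError exactly where A does),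
-- 	# then each of the four slots is decided independently by the last matching executor.
-- 	mapped = [(e, executormapping[e]) for e in argsexecutor]
-- 	result = []
-- 	for slot, default in (("py", "inmemory"), ("js", "javascript"), ("class", "java"), ("so", "c")):
-- 		choice = default
-- 		for e, m in reversed(mapped):
-- 			if m is None or m == slot:
-- 				choice = e
-- 				break
-- 		result.append(choice)
-- 	return list(set(result))
-- ===== Notes on version B (the rewrite author's own statement) =====
-- stated objective: alternative
-- what changed: A threads a mutable 4-slot dict through one forward loop (a None mapping rewriting every slot); B resolves the mappings in one forward pass and then decides each of the four slots independently by a backward scan for the last matching executor.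
import Mathlib
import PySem

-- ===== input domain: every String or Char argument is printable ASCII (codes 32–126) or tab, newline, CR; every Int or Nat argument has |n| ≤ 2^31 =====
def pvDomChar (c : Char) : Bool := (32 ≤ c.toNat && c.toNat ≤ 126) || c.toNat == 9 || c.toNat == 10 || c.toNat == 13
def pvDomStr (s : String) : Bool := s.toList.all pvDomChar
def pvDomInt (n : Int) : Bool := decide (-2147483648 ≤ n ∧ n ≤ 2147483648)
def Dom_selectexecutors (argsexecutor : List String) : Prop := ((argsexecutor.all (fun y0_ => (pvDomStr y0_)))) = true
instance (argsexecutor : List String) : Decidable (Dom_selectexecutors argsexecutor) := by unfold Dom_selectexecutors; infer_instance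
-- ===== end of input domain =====

-- B replaces A's stateful forward dict-update loop by an independent backward search
-- per slot (objective: alternative decomposition; return value only, no mutation).

-- module-level constant `executormapping` (shared context of both Pythons)
def pvEmap : PySem.Dict String (Option String) := PySem.Dict.ofList
  [("c", some "so"), ("docker", none), ("inmemory", some "py"), ("lxc", some "py"),
   ("inmemstateless", some "py"), ("java", some "class"), ("javascript", some "js"),
   ("openshift", none), ("proxy", none), ("python2", some "py"),
   ("python2stateful", some "py"), ("python3", some "py")]

-- ===== PORT A =====
-- one iteration of A's loop body; `none` branch of the outer match = Python KeyError (excluded by Pre_)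
-- truthiness of `executormapping[executor]`: every non-None value is a nonempty string, so `some t` is truthy
def pvStepA (d : PySem.Dict String String) (executor : String) : PySem.Dict String String :=
  match pvEmap.get? executor with
  | some (some t) => d.insert t executor
  | some none => d.keys.foldl (fun acc ex => acc.insert ex executor) d
  | none => d

def selectexecutors (argsexecutor : List String) : List String :=
  let executors := PySem.Dict.ofList [("py", "inmemory"), ("js", "javascript"), ("class", "java"), ("so", "c")]
  PySem.Set.ofList (argsexecutor.foldl pvStepA executors).values

-- ===== PORT B =====
def pvDefaults : List (String × String) :=
  [("py", "inmemory"), ("js", "javascript"), ("class", "java"), ("so", "c")]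

-- `executormapping[e]` of Source B's forward pass; missing key (Python KeyError, outside Pre_) defaults to none
def selectexecutors_alt (argsexecutor : List String) : List String :=
  let mapped := argsexecutor.map (fun e => (e, (pvEmap.get? e).getD none))
  let result := pvDefaults.map (fun sd =>
    match mapped.reverse.find? (fun p => p.2 == none || p.2 == some sd.1) with
    | some p => p.1
    | none => sd.2)
  PySem.Set.ofList result

-- ===== PRECONDITION & SPEC =====
-- Pre_ excludes executors absent from executormapping, on which A (and B) raise KeyError.
def Pre_selectexecutors (argsexecutor : List String) : Prop :=
  argsexecutor.all (fun e => pvEmap.contains e) = true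
instance (argsexecutor : List String) : Decidable (Pre_selectexecutors argsexecutor) := by
  unfold Pre_selectexecutors; infer_instance
def pvWitness_selectexecutors : List String := ["python3", "docker", "java"]

def Spec_selectexecutors (argsexecutor : List String) (out : List String) : Prop := out = selectexecutors_alt argsexecutor
instance (argsexecutor : List String) (out : List String) : Decidable (Spec_selectexecutors argsexecutor out) := by unfold Spec_selectexecutors; infer_instance

-- ===== CLAIM (what is proved, stated in full; the proofs are below) =====
def Claim_equal_selectexecutors : Prop := ∀ (argsexecutor : List String), Dom_selectexecutors argsexecutor → Pre_selectexecutors argsexecutor → Spec_selectexecutors argsexecutor (selectexecutors argsexecutor)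

-- ===== LEMMAS AND PROOFS =====

-- proof-side view of B's per-slot choice, phrased on the raw executor list
def pvQ (slot e : String) : Bool :=
  ((pvEmap.get? e).getD none == none || (pvEmap.get? e).getD none == some slot)

def pvPick (slot dflt : String) (l : List String) : String :=
  match l.reverse.find? (pvQ slot) with
  | some e => e
  | none => dflt

lemma pvPick_cons (slot dflt x : String) (xs : List String) :
    pvPick slot dflt (x :: xs) = pvPick slot (if pvQ slot x then x else dflt) xs := by
  simp only [pvPick, List.reverse_cons, List.find?_append]
  cases h : xs.reverse.find? (pvQ slot) with
  | some e => simp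
  | none =>
    by_cases hq : pvQ slot x <;> simp [List.find?, hq]

lemma pvLoopA_eq (l : List String) (hv : ∀ e ∈ l, pvEmap.contains e = true)
    (a b c d : String) :
    l.foldl pvStepA (PySem.Dict.ofList [("py", a), ("js", b), ("class", c), ("so", d)]) =
      PySem.Dict.ofList [("py", pvPick "py" a l), ("js", pvPick "js" b l),
        ("class", pvPick "class" c l), ("so", pvPick "so" d l)] := by
  induction l generalizing a b c d with
  | nil => rfl
  | cons x xs ih =>
    have hx : pvEmap.contains x = true := hv x (List.mem_cons_self)
    have hxs : ∀ e ∈ xs, pvEmap.contains e = true := fun e he => hv e (List.mem_cons_of_mem _ he)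
    have hsome : (pvEmap.get? x).isSome := by
      rw [← PySem.Dict.contains_eq_isSome_get?]; exact hx
    obtain ⟨mx, hmx⟩ := Option.isSome_iff_exists.mp hsome
    have hmem : (x, mx) ∈ pvEmap.items := PySem.Dict.mem_items_of_get?_eq_some _ hmx
    have hval : mx = some "so" ∨ mx = none ∨ mx = some "py" ∨ mx = some "class" ∨
        mx = some "js" := by
      rw [show pvEmap.items = [("c", some "so"), ("docker", none), ("inmemory", some "py"),
        ("lxc", some "py"), ("inmemstateless", some "py"), ("java", some "class"),
        ("javascript", some "js"), ("openshift", none), ("proxy", none), ("python2", some "py"),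
        ("python2stateful", some "py"), ("python3", some "py")] from rfl] at hmem
      simp at hmem
      tauto
    simp only [List.foldl_cons, pvPick_cons]
    rcases hval with h | h | h | h | h <;> subst h
    · rw [show pvStepA (PySem.Dict.ofList [("py", a), ("js", b), ("class", c), ("so", d)]) x
          = PySem.Dict.ofList [("py", a), ("js", b), ("class", c), ("so", x)] from by
            simp only [pvStepA, hmx]; rfl]
      rw [ih hxs]; simp [pvQ, hmx]
    · rw [show pvStepA (PySem.Dict.ofList [("py", a), ("js", b), ("class", c), ("so", d)]) x
          = PySem.Dict.ofList [("py", x), ("js", x), ("class", x), ("so", x)] from by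
            simp only [pvStepA, hmx]; rfl]
      rw [ih hxs]; simp [pvQ, hmx]
    · rw [show pvStepA (PySem.Dict.ofList [("py", a), ("js", b), ("class", c), ("so", d)]) x
          = PySem.Dict.ofList [("py", x), ("js", b), ("class", c), ("so", d)] from by
            simp only [pvStepA, hmx]; rfl]
      rw [ih hxs]; simp [pvQ, hmx]
    · rw [show pvStepA (PySem.Dict.ofList [("py", a), ("js", b), ("class", c), ("so", d)]) x
          = PySem.Dict.ofList [("py", a), ("js", b), ("class", x), ("so", d)] from by
            simp only [pvStepA, hmx]; rfl]
      rw [ih hxs]; simp [pvQ, hmx]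
    · rw [show pvStepA (PySem.Dict.ofList [("py", a), ("js", b), ("class", c), ("so", d)]) x
          = PySem.Dict.ofList [("py", a), ("js", x), ("class", c), ("so", d)] from by
            simp only [pvStepA, hmx]; rfl]
      rw [ih hxs]; simp [pvQ, hmx]

lemma pvAlt_eq_pick (l : List String) :
    selectexecutors_alt l = PySem.Set.ofList
      [pvPick "py" "inmemory" l, pvPick "js" "javascript" l,
       pvPick "class" "java" l, pvPick "so" "c" l] := by
  unfold selectexecutors_alt pvDefaults
  simp only [List.map_cons, List.map_nil]
  have key : ∀ (slot dflt : String),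
      (match (l.map (fun e => (e, (pvEmap.get? e).getD none))).reverse.find?
          (fun p => p.2 == none || p.2 == some slot) with
        | some p => p.1
        | none => dflt) = pvPick slot dflt l := by
    intro slot dflt
    rw [← List.map_reverse, List.find?_map]
    unfold pvPick
    have : ((fun (p : String × Option String) => p.2 == none || p.2 == some slot) ∘
        (fun e => (e, (pvEmap.get? e).getD none))) = pvQ slot := rfl
    rw [this]
    cases l.reverse.find? (pvQ slot) <;> rfl
  rw [key, key, key, key]

-- ===== VERDICT (by name: the statement is the Claim_ definition above) =====
theorem selectexecutors_spec : Claim_equal_selectexecutors := by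
  intro l _ hpre
  unfold Spec_selectexecutors
  rw [pvAlt_eq_pick]
  have hv : ∀ e ∈ l, pvEmap.contains e = true := by
    intro e he
    exact List.all_eq_true.mp hpre e he
  show PySem.Set.ofList
      (l.foldl pvStepA (PySem.Dict.ofList
        [("py", "inmemory"), ("js", "javascript"), ("class", "java"), ("so", "c")])).values
    = _
  rw [pvLoopA_eq l hv]
  rfl
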